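-- pv_equiv track=rewrite | github.com/zGoldthorpe/A-Mini | ui/stats.py | name_compressor
-- ===== SOURCE A (Python) =====
-- def name_compressor(names):
--     """
--     Reduces a list of names to a list of 'critical' letters,
--     where a letter is 'critical' if it has several siblings in
--     the trie corresponding to the set of names
--
--     returns dict mapping names to compressed strings
--     """
--     if len(names) == 1:
--         return { name : name[0] for name in names }
--     # first, build trie with no info
--     trie = {}
--     for name in names:
--         ptr = trie
--         for c in name:
--             ptr = ptr.setdefault(c, {})
--         ptr[0] = name # indicate that this is also a name
--     def reduced(name):
--         ptr = trie
--         out = ""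
--         for c in name:
--             if len(ptr) > 1:
--                 out += c
--             ptr = ptr[c]
--         return out
--     return { name : reduced(name) for name in names }
-- ===== SOURCE B (Python) =====
-- def _lcp(a, b):
--     i = 0
--     while i < len(a) and i < len(b) and a[i] == b[i]:
--         i += 1
--     return i
--
-- def name_compressor(names):
--     """
--     Same mapping as the trie version, computed without a trie: position i of
--     name n is 'critical' exactly when some name in the list shares precisely
--     the first i characters with n (diverges or ends at i).
--     """
--     if len(names) == 1:
--         return { name : name[0] for name in names }
--     res = {}
--     for n in names:
--         crit = { _lcp(m, n) for m in names }
--         res[n] = "".join(c for i, c in enumerate(n) if i in crit)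
--     return res
-- ===== Notes on version B (the rewrite author's own statement) =====
-- stated objective: simpler
-- what changed: B drops A's trie construction entirely: a position i of name n is critical iff some name's longest-common-prefix length with n equals i, so B computes the pairwise lcp set per name and filters n's characters by it.
-- outside the precondition, e.g. on name_compressor(['']): A raises IndexError, B raises IndexError
import Mathlib
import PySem

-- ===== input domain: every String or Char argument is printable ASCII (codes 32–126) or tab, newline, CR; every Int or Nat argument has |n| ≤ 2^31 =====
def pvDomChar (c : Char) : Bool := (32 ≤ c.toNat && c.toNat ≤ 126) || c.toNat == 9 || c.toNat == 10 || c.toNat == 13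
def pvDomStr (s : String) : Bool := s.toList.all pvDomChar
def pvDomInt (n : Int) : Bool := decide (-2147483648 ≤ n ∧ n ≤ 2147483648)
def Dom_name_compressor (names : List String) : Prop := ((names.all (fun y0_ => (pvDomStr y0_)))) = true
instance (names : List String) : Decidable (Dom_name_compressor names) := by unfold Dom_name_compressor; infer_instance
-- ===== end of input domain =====

-- B replaces A's trie with a direct pairwise longest-common-prefix computation of the
-- same critical positions (objective: simpler — no trie data structure is built).

-- ===== PORT A =====
-- Python nested trie dicts have keys = child chars plus the sentinel key 0 marking a
-- stored name; we model a node as (marker : Option name, ordered child list) — the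
-- dict length len(ptr) is childCount + (1 if marker present).
mutual
inductive PTrie where
  | node : Option (List Char) → PChildren → PTrie
inductive PChildren where
  | nil : PChildren
  | cons : Char → PTrie → PChildren → PChildren
end

def PChildren.find : PChildren → Char → Option PTrie
  | .nil, _ => none
  | .cons c t r, x => if c = x then some t else r.find x

-- ptr.setdefault(c, {}) followed by writing back the updated child (functional rendering
-- of Python's in-place mutation): replace in place if present, append if new.
def PChildren.set : PChildren → Char → PTrie → PChildren
  | .nil, c, t => .cons c t .nil
  | .cons c' t' r, c, t => if c' = c then .cons c' t r else .cons c' t' (r.set c t)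

def PChildren.count : PChildren → Nat
  | .nil => 0
  | .cons _ _ r => r.count + 1

def PTrie.children : PTrie → PChildren
  | .node _ ch => ch

def PTrie.marker : PTrie → Option (List Char)
  | .node m _ => m

-- len(ptr)
def PTrie.size (t : PTrie) : Nat :=
  t.children.count + (if t.marker.isSome then 1 else 0)

-- the inner 'for c in name: ptr = ptr.setdefault(c, {})' walk followed by 'ptr[0] = name'
def trieInsert : PTrie → List Char → List Char → PTrie
  | .node _ ch, [], name => .node (some name) ch
  | .node m ch, c :: rest, name =>
      .node m (ch.set c (trieInsert ((ch.find c).getD (.node none .nil)) rest name))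

-- the 'reduced' helper; the 'none' branch is Python's KeyError, unreachable because
-- reduced is only called on names that were inserted into the trie
def reduced : PTrie → List Char → List Char → List Char
  | _, [], out => out
  | t, c :: cs, out =>
      let out' := if t.size > 1 then out ++ [c] else out
      match t.children.find c with
      | some t' => reduced t' cs out'
      | none => out'

def name_compressor (names : List String) : List (String × String) :=
  if names.length = 1 then
    -- { name : name[0] for name in names }; name[0] raises IndexError on "", excluded by Pre_
    (names.foldl (fun d name =>
        d.insert name (match PySem.Str.pyGet? name 0 with
          | some c => String.mk [c]
          | none => "")) PySem.Dict.empty).items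
  else
    let trie := names.foldl (fun t name => trieInsert t name.toList name.toList)
      (.node none .nil)
    (names.foldl (fun d name =>
        d.insert name (String.mk (reduced trie name.toList []))) PySem.Dict.empty).items

-- ===== PORT B =====
-- _lcp: the while loop counting matching leading characters
def lcpAux : List Char → List Char → Int
  | a :: as, b :: bs => if a = b then lcpAux as bs + 1 else 0
  | _, _ => 0

def name_compressor_alt (names : List String) : List (String × String) :=
  if names.length = 1 then
    (names.foldl (fun d name =>
        d.insert name (match PySem.Str.pyGet? name 0 with
          | some c => String.mk [c]
          | none => "")) PySem.Dict.empty).items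
  else
    (names.foldl (fun d n =>
        let crit : PySem.Set Int :=
          PySem.Set.ofList (names.map (fun m => lcpAux m.toList n.toList))
        d.insert n (String.mk ((PySem.List.enumerate n.toList).filterMap
          (fun p => if PySem.Set.contains crit p.1 then some p.2 else none))))
      PySem.Dict.empty).items

-- ===== PRECONDITION & SPEC =====
-- Pre_ excludes only names = [""], where Python A (and Python B) raise IndexError on name[0].
def Pre_name_compressor (names : List String) : Prop := names ≠ [""]
instance (names : List String) : Decidable (Pre_name_compressor names) := by
  unfold Pre_name_compressor; infer_instance

def pvWitness_name_compressor : List String := ["interp", "trace", "interpreter"]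

def Spec_name_compressor (names : List String) (out : List (String × String)) : Prop := out = name_compressor_alt names
instance (names : List String) (out : List (String × String)) : Decidable (Spec_name_compressor names out) := by unfold Spec_name_compressor; infer_instance

-- ===== CLAIM (what is proved, stated in full; the proofs are below) =====
def Claim_equal_name_compressor : Prop := ∀ (names : List String), Dom_name_compressor names → Pre_name_compressor names → Spec_name_compressor names (name_compressor names)

-- ===== LEMMAS AND PROOFS =====

-- proof-side view of a trie: keys of a node's child list, node lookup along a path
def PChildren.keysList : PChildren → List Char
  | .nil => []
  | .cons c _ r => c :: r.keysList

def nodeAt : PTrie → List Char → Option PTrie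
  | t, [] => some t
  | t, c :: p =>
      match t.children.find c with
      | some t' => nodeAt t' p
      | none => none

def optMarker (o : Option PTrie) : Option (List Char) :=
  match o with | some u => u.marker | none => none

def optKeys (o : Option PTrie) : List Char :=
  match o with | some u => u.children.keysList | none => []

theorem count_eq_length_keys : ∀ ch : PChildren, ch.count = ch.keysList.length
  | .nil => rfl
  | .cons c t r => by simp [PChildren.count, PChildren.keysList, count_eq_length_keys r]

theorem find_set_self : ∀ (ch : PChildren) (c : Char) (t : PTrie),
    (ch.set c t).find c = some t
  | .nil, c, t => by simp [PChildren.set, PChildren.find]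
  | .cons c' t' r, c, t => by
    by_cases h : c' = c <;> simp [PChildren.set, PChildren.find, h, find_set_self r c t]

theorem find_set_ne : ∀ (ch : PChildren) (c d : Char) (t : PTrie), d ≠ c →
    (ch.set c t).find d = ch.find d
  | .nil, c, d, t, h => by simp [PChildren.set, PChildren.find, Ne.symm h]
  | .cons c' t' r, c, d, t, h => by
    by_cases hc : c' = c
    · subst hc; simp [PChildren.set, PChildren.find, Ne.symm h]
    · by_cases hd : c' = d
      · subst hd; simp [PChildren.set, PChildren.find, hc]
      · simp [PChildren.set, PChildren.find, hc, hd, find_set_ne r c d t h]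

theorem keys_set : ∀ (ch : PChildren) (c : Char) (t : PTrie),
    (ch.set c t).keysList =
      if c ∈ ch.keysList then ch.keysList else ch.keysList ++ [c]
  | .nil, c, t => by simp [PChildren.set, PChildren.keysList]
  | .cons c' t' r, c, t => by
    by_cases h : c' = c
    · subst h; simp [PChildren.set, PChildren.keysList]
    · simp only [PChildren.set, if_neg h, PChildren.keysList, keys_set r c t,
        List.mem_cons]
      by_cases hm : c ∈ r.keysList <;> simp [hm, Ne.symm h]

theorem nodeAt_append (T : PTrie) (p q : List Char) :
    nodeAt T (p ++ q) = (nodeAt T p).bind (fun u => nodeAt u q) := by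
  induction p generalizing T with
  | nil => simp [nodeAt]
  | cons c p ih =>
    simp only [List.cons_append, nodeAt]
    cases T.children.find c with
    | some t' => simp [ih]
    | none => simp

theorem nodeAt_snoc (T : PTrie) (p : List Char) (c : Char) :
    nodeAt T (p ++ [c]) = (nodeAt T p).bind (fun u => u.children.find c) := by
  rw [nodeAt_append]
  cases nodeAt T p with
  | none => rfl
  | some u =>
    simp only [Option.bind_some, nodeAt]
    cases u.children.find c <;> simp [nodeAt]

-- effect of trieInsert away from the inserted path
theorem nodeAt_cons (m : Option (List Char)) (ch : PChildren) (c : Char) (p : List Char) :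
    nodeAt (PTrie.node m ch) (c :: p) =
      (match ch.find c with | some t' => nodeAt t' p | none => none) := rfl

theorem optMarker_sub (m : Option (List Char)) (ch : PChildren) (a : Char) (p : List Char) :
    optMarker (nodeAt ((ch.find a).getD (.node none .nil)) p) =
      optMarker (nodeAt (PTrie.node m ch) (a :: p)) := by
  rw [nodeAt_cons]
  cases hfind : ch.find a with
  | some t' => simp
  | none =>
    cases p with
    | nil => rfl
    | cons d r => simp [nodeAt, PTrie.children, PChildren.find]

theorem optKeys_sub (m : Option (List Char)) (ch : PChildren) (a : Char) (p : List Char) :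
    optKeys (nodeAt ((ch.find a).getD (.node none .nil)) p) =
      optKeys (nodeAt (PTrie.node m ch) (a :: p)) := by
  rw [nodeAt_cons]
  cases hfind : ch.find a with
  | some t' => simp
  | none =>
    cases p with
    | nil => rfl
    | cons d r => simp [nodeAt, PTrie.children, PChildren.find]

theorem nodeAt_insert_of_not_prefix (cs : List Char) :
    ∀ (t : PTrie) (name p : List Char), ¬ p <+: cs →
      nodeAt (trieInsert t cs name) p = nodeAt t p := by
  induction cs with
  | nil =>
    intro t name p hp
    cases t with | node m ch =>
    cases p with
    | nil => exact absurd List.nil_prefix hp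
    | cons d p' => simp [trieInsert, nodeAt, PTrie.children]
  | cons c rest ih =>
    intro t name p hp
    cases t with | node m ch =>
    cases p with
    | nil => exact absurd List.nil_prefix hp
    | cons d p' =>
      by_cases hdc : d = c
      · subst hdc
        have hp' : ¬ p' <+: rest := fun hh => hp (List.cons_prefix_cons.mpr ⟨rfl, hh⟩)
        simp only [trieInsert, nodeAt_cons, find_set_self]
        rw [ih _ name p' hp']
        cases hfind : ch.find d with
        | some t' => simp
        | none =>
          cases p' with
          | nil => exact absurd List.nil_prefix hp'
          | cons e q => simp [nodeAt, PTrie.children, PChildren.find]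
      · simp only [trieInsert, nodeAt_cons]
        rw [find_set_ne _ _ _ _ hdc]

-- effect at the inserted path itself
theorem nodeAt_insert_self (cs : List Char) :
    ∀ (t : PTrie) (name : List Char), ∃ u,
      nodeAt (trieInsert t cs name) cs = some u ∧
      u.marker = some name ∧
      u.children.keysList = optKeys (nodeAt t cs) := by
  induction cs with
  | nil =>
    intro t name
    cases t with | node m ch =>
    exact ⟨_, rfl, rfl, rfl⟩
  | cons c rest ih =>
    intro t name
    cases t with | node m ch =>
    obtain ⟨u, h1, h2, h3⟩ := ih ((ch.find c).getD (.node none .nil)) name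
    refine ⟨u, ?_, h2, ?_⟩
    · simp only [trieInsert, nodeAt_cons, find_set_self]
      exact h1
    · rw [h3, optKeys_sub m ch c rest]

-- effect at a proper prefix of the inserted path
theorem nodeAt_insert_prefix (p : List Char) :
    ∀ (t : PTrie) (c : Char) (tail name : List Char), ∃ u,
      nodeAt (trieInsert t (p ++ c :: tail) name) p = some u ∧
      u.marker = optMarker (nodeAt t p) ∧
      u.children.keysList =
        (if c ∈ optKeys (nodeAt t p) then optKeys (nodeAt t p)
         else optKeys (nodeAt t p) ++ [c]) := by
  induction p with
  | nil =>
    intro t c tail name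
    cases t with | node m ch =>
    refine ⟨_, rfl, rfl, ?_⟩
    simp only [optKeys, nodeAt, PTrie.children, List.nil_append, trieInsert]
    rw [keys_set]
  | cons a p' ih =>
    intro t c tail name
    cases t with | node m ch =>
    obtain ⟨u, h1, h2, h3⟩ := ih ((ch.find a).getD (.node none .nil)) c tail name
    refine ⟨u, ?_, ?_, ?_⟩
    · simp only [List.cons_append, trieInsert, nodeAt_cons, find_set_self]
      exact h1
    · rw [h2, optMarker_sub m ch a p']
    · rw [h3, optKeys_sub m ch a p']

-- the trie invariant relating the built trie to the list of inserted names
def TrieInv (T : PTrie) (S : List (List Char)) : Prop :=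
  ∀ p : List Char,
    ((nodeAt T p).isSome ↔ (p = [] ∨ ∃ m ∈ S, p <+: m)) ∧
    (∀ u, nodeAt T p = some u →
      (u.marker.isSome = true ↔ p ∈ S) ∧
      (∀ c, c ∈ u.children.keysList ↔ ∃ m ∈ S, p ++ [c] <+: m) ∧
      u.children.keysList.Nodup)

theorem TrieInv_empty : TrieInv (.node none .nil) [] := by
  intro p
  cases p with
  | nil => simp [nodeAt, PTrie.marker, PTrie.children, PChildren.keysList]
  | cons c p' => simp [nodeAt, PTrie.children, PChildren.find]

theorem TrieInv_none_facts {T : PTrie} {S : List (List Char)} (hInv : TrieInv T S)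
    {p : List Char} (hOld : nodeAt T p = none) :
    p ∉ S ∧ ∀ m' ∈ S, ¬ p <+: m' := by
  have hnone : ¬ (p = [] ∨ ∃ m' ∈ S, p <+: m') := by
    intro hcon
    have := ((hInv p).1).mpr hcon
    rw [hOld] at this; simp at this
  push_neg at hnone
  exact ⟨fun hmem => hnone.2 p hmem (List.prefix_refl _), hnone.2⟩

theorem TrieInv_insert {T : PTrie} {S : List (List Char)} (hInv : TrieInv T S)
    (m : List Char) : TrieInv (trieInsert T m m) (S ++ [m]) := by
  intro p
  by_cases hp : p <+: m
  · by_cases hpm : p = m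
    · subst hpm
      obtain ⟨u, h1, h2, h3⟩ := nodeAt_insert_self p T p
      refine ⟨by
        rw [h1]
        simp only [Option.isSome_some, true_iff, List.mem_append, List.mem_singleton]
        exact Or.inr ⟨p, Or.inr rfl, List.prefix_refl _⟩, ?_⟩
      intro u' hu'
      rw [h1] at hu'
      injection hu' with hu'; subst hu'
      refine ⟨by simp [h2], ?_, ?_⟩
      · intro c
        rw [h3]
        cases hOld : nodeAt T p with
        | some v =>
          have hv := ((hInv p).2 v hOld).2.1 c
          simp only [optKeys, hv]
          constructor
          · rintro ⟨m', hm', hpre⟩; exact ⟨m', by simp [hm'], hpre⟩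
          · rintro ⟨m', hm', hpre⟩
            rcases List.mem_append.mp hm' with h | h
            · exact ⟨m', h, hpre⟩
            · simp only [List.mem_singleton] at h; subst h
              exact absurd (List.IsPrefix.length_le hpre) (by simp)
        | none =>
          obtain ⟨-, hnp⟩ := TrieInv_none_facts hInv hOld
          simp only [optKeys, List.not_mem_nil, false_iff]
          rintro ⟨m', hm', hpre⟩
          rcases List.mem_append.mp hm' with h | h
          · exact hnp m' h ((List.prefix_append p [c]).trans hpre)
          · simp only [List.mem_singleton] at h; subst h
            exact absurd (List.IsPrefix.length_le hpre) (by simp)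
      · rw [h3]
        cases hOld : nodeAt T p with
        | some v => simpa [optKeys] using ((hInv p).2 v hOld).2.2
        | none => simp [optKeys]
    · -- p is a proper prefix of m
      obtain ⟨tl, htl⟩ := hp
      have htl' : tl ≠ [] := by rintro rfl; exact hpm (by simpa using htl)
      obtain ⟨c, tail, rfl⟩ : ∃ c tail, tl = c :: tail := by
        cases tl with
        | nil => exact absurd rfl htl'
        | cons c tail => exact ⟨c, tail, rfl⟩
      subst htl
      have hsnoc : ∀ d : Char, (p ++ [d] <+: p ++ c :: tail) ↔ d = c := by
        intro d
        rw [List.prefix_append_right_inj]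
        simp [List.cons_prefix_cons]
      have hlen : p ≠ p ++ c :: tail := by
        intro hcon
        exact absurd (congrArg List.length hcon) (by simp)
      obtain ⟨u, h1, h2, h3⟩ := nodeAt_insert_prefix p T c tail (p ++ c :: tail)
      refine ⟨?_, ?_⟩
      · rw [h1]
        simp only [Option.isSome_some, true_iff]
        exact Or.inr ⟨p ++ c :: tail, by simp, List.prefix_append _ _⟩
      · intro u' hu'
        rw [h1] at hu'
        injection hu' with hu'; subst hu'
        cases hOld : nodeAt T p with
        | some v =>
          rw [hOld] at h2 h3
          simp only [optMarker] at h2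
          simp only [optKeys] at h3
          obtain ⟨hvm, hvk, hvnd⟩ := (hInv p).2 v hOld
          refine ⟨?_, ?_, ?_⟩
          · rw [h2, hvm]
            constructor
            · intro h; exact List.mem_append.mpr (Or.inl h)
            · intro h
              rcases List.mem_append.mp h with h | h
              · exact h
              · simp only [List.mem_singleton] at h; exact absurd h hlen
          · intro d
            rw [h3]
            by_cases hc : c ∈ v.children.keysList
            · rw [if_pos hc]
              rw [hvk d]
              constructor
              · rintro ⟨m', hm', hpre⟩; exact ⟨m', List.mem_append.mpr (Or.inl hm'), hpre⟩
              · rintro ⟨m', hm', hpre⟩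
                rcases List.mem_append.mp hm' with h | h
                · exact ⟨m', h, hpre⟩
                · simp only [List.mem_singleton] at h; subst h
                  have hd := (hsnoc d).mp hpre
                  subst hd
                  exact (hvk d).mp hc
            · rw [if_neg hc]
              constructor
              · intro h
                rcases List.mem_append.mp h with h | h
                · obtain ⟨m', hm', hpre⟩ := (hvk d).mp h
                  exact ⟨m', List.mem_append.mpr (Or.inl hm'), hpre⟩
                · simp only [List.mem_singleton] at h; subst h
                  exact ⟨p ++ d :: tail, List.mem_append.mpr (Or.inr (by simp)),
                    (hsnoc d).mpr rfl⟩
              · rintro ⟨m', hm', hpre⟩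
                rcases List.mem_append.mp hm' with h | h
                · exact List.mem_append.mpr (Or.inl ((hvk d).mpr ⟨m', h, hpre⟩))
                · simp only [List.mem_singleton] at h; subst h
                  exact List.mem_append.mpr (Or.inr (by simp [(hsnoc d).mp hpre]))
          · rw [h3]
            by_cases hc : c ∈ v.children.keysList
            · rw [if_pos hc]; exact hvnd
            · rw [if_neg hc]
              exact List.Nodup.append hvnd (by simp) (by simpa using hc)
        | none =>
          rw [hOld] at h2 h3
          simp only [optMarker] at h2
          simp only [optKeys, List.not_mem_nil, if_false, List.nil_append] at h3
          obtain ⟨hpS, hnp⟩ := TrieInv_none_facts hInv hOld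
          refine ⟨?_, ?_, ?_⟩
          · rw [h2]
            simp only [Option.isSome_none, List.mem_append, List.mem_singleton]
            constructor
            · intro h; simp at h
            · rintro (h | h)
              · exact absurd h hpS
              · exact absurd h hlen
          · intro d
            rw [h3]
            simp only [List.mem_singleton]
            constructor
            · rintro rfl
              exact ⟨p ++ d :: tail, List.mem_append.mpr (Or.inr (by simp)),
                (hsnoc d).mpr rfl⟩
            · rintro ⟨m', hm', hpre⟩
              rcases List.mem_append.mp hm' with h | h
              · exact absurd ((List.prefix_append p [d]).trans hpre) (hnp m' h)
              · simp only [List.mem_singleton] at h; subst h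
                exact (hsnoc d).mp hpre
          · rw [h3]; simp
  · -- p untouched by the insertion
    rw [(nodeAt_insert_of_not_prefix m T m p hp :
      nodeAt (trieInsert T m m) p = nodeAt T p)]
    constructor
    · rw [(hInv p).1]
      constructor
      · rintro (h | ⟨m', hm', hpre⟩)
        · exact Or.inl h
        · exact Or.inr ⟨m', by simp [hm'], hpre⟩
      · rintro (h | ⟨m', hm', hpre⟩)
        · exact Or.inl h
        · rcases List.mem_append.mp hm' with h' | h'
          · exact Or.inr ⟨m', h', hpre⟩
          · simp only [List.mem_singleton] at h'; subst h'
            exact absurd hpre hp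
    · intro u hu
      obtain ⟨hm, hk, hnd⟩ := (hInv p).2 u hu
      refine ⟨?_, ?_, hnd⟩
      · rw [hm]
        simp only [List.mem_append, List.mem_singleton]
        exact ⟨Or.inl, fun h => h.elim id (fun h' => absurd (h' ▸ List.prefix_refl p) hp)⟩
      · intro c
        rw [hk c]
        constructor
        · rintro ⟨m', hm', hpre⟩; exact ⟨m', by simp [hm'], hpre⟩
        · rintro ⟨m', hm', hpre⟩
          rcases List.mem_append.mp hm' with h' | h'
          · exact ⟨m', h', hpre⟩
          · simp only [List.mem_singleton] at h'; subst h'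
            exact absurd ((List.prefix_append p [c]).trans hpre) hp

theorem TrieInv_foldl (l : List String) :
    ∀ (t : PTrie) (S : List (List Char)), TrieInv t S →
      TrieInv (l.foldl (fun t nm => trieInsert t nm.toList nm.toList) t)
        (S ++ l.map String.toList) := by
  induction l with
  | nil => intro t S h; simpa using h
  | cons hd tl ih =>
    intro t S h
    have := ih (trieInsert t hd.toList hd.toList) (S ++ [hd.toList])
      (TrieInv_insert h hd.toList)
    simpa using this

-- natural-number view of the lcp counter
def lcpN : List Char → List Char → Nat
  | a :: as, b :: bs => if a = b then lcpN as bs + 1 else 0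
  | _, _ => 0

theorem lcpAux_eq : ∀ a b : List Char, lcpAux a b = (lcpN a b : Int)
  | [], b => by cases b <;> rfl
  | a :: as, [] => rfl
  | a :: as, b :: bs => by
    by_cases h : a = b <;> simp [lcpAux, lcpN, h, lcpAux_eq as bs]

-- lcp(m, n) picks out exactly the positions where m ends at or diverges from n
theorem lcpN_eq_iff : ∀ (p : List Char) (c : Char) (rest m : List Char),
    lcpN m (p ++ c :: rest) = p.length ↔ (m = p ∨ ∃ d, d ≠ c ∧ p ++ [d] <+: m)
  | [], c, rest, m => by
    cases m with
    | nil => simp [lcpN]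
    | cons b m' =>
      simp only [List.nil_append, List.length_nil]
      by_cases h : b = c
      · have hstep : lcpN (b :: m') (c :: rest) = lcpN m' rest + 1 := by
          simp [lcpN, h]
        rw [hstep]
        constructor
        · intro hcon; exact absurd hcon (Nat.succ_ne_zero _)
        · rintro (hcon | ⟨d, hd, hpre⟩)
          · exact absurd hcon (List.cons_ne_nil _ _)
          · rcases List.cons_prefix_cons.mp hpre with ⟨h1, -⟩
            exact absurd (h1.trans h) hd
      · have hstep : lcpN (b :: m') (c :: rest) = 0 := by simp [lcpN, h]
        rw [hstep]
        constructor
        · intro _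
          exact Or.inr ⟨b, h, List.cons_prefix_cons.mpr ⟨rfl, List.nil_prefix⟩⟩
        · intro _; rfl
  | a :: p', c, rest, m => by
    cases m with
    | nil =>
      simp only [lcpN, List.length_cons]
      constructor
      · intro hcon; exact absurd hcon.symm (Nat.succ_ne_zero _)
      · rintro (hcon | ⟨d, hd, hpre⟩)
        · exact absurd hcon (by simp)
        · exact absurd (List.IsPrefix.length_le hpre) (by simp)
    | cons b m' =>
      simp only [List.cons_append, List.length_cons]
      by_cases h : b = a
      · subst h
        have hstep : lcpN (b :: m') (b :: (p' ++ c :: rest))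
            = lcpN m' (p' ++ c :: rest) + 1 := by simp [lcpN]
        rw [hstep, Nat.add_right_cancel_iff, lcpN_eq_iff p' c rest m']
        constructor
        · rintro (rfl | ⟨d, hd, hpre⟩)
          · exact Or.inl rfl
          · exact Or.inr ⟨d, hd, List.cons_prefix_cons.mpr ⟨rfl, hpre⟩⟩
        · rintro (hcon | ⟨d, hd, hpre⟩)
          · injection hcon with h1 h2
            exact Or.inl h2
          · rcases List.cons_prefix_cons.mp hpre with ⟨-, hpre'⟩
            exact Or.inr ⟨d, hd, hpre'⟩
      · have hstep : lcpN (b :: m') (a :: (p' ++ c :: rest)) = 0 := by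
          simp [lcpN, h]
        rw [hstep]
        constructor
        · intro hcon; exact absurd hcon.symm (Nat.succ_ne_zero _)
        · rintro (hcon | ⟨d, hd, hpre⟩)
          · injection hcon with h1 _
            exact absurd h1 h
          · rcases List.cons_prefix_cons.mp hpre with ⟨h1, -⟩
            exact absurd h1.symm h

-- the accumulator of reduced is pure prefix state
theorem reduced_acc : ∀ (cs : List Char) (t : PTrie) (a : List Char),
    reduced t cs a = a ++ reduced t cs []
  | [], t, a => by simp [reduced]
  | c :: cs, t, a => by
    simp only [reduced]
    cases hfind : t.children.find c with
    | some t' =>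
      by_cases hs : t.size > 1 <;>
        simp [hs, reduced_acc cs t' (a ++ [c]), reduced_acc cs t' [c],
          reduced_acc cs t' a]
    | none => by_cases hs : t.size > 1 <;> simp [hs]

theorem length_ge_two_of_mem_ne {l : List Char} {a b : Char}
    (ha : a ∈ l) (hb : b ∈ l) (hab : a ≠ b) : 2 ≤ l.length := by
  match l with
  | [] => simp at ha
  | [x] =>
    simp only [List.mem_singleton] at ha hb
    exact absurd (ha.trans hb.symm) hab
  | x :: y :: t => simp

theorem exists_ne_of_two_le {l : List Char} {c : Char}
    (hnd : l.Nodup) (h2 : 2 ≤ l.length) : ∃ d ∈ l, d ≠ c := by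
  match l with
  | [] => simp at h2
  | [x] => simp at h2
  | x :: y :: t =>
    have hxy : x ≠ y := by
      rcases List.nodup_cons.mp hnd with ⟨hx, -⟩
      intro h
      exact hx (h ▸ List.mem_cons_self)
    by_cases hx : x = c
    · refine ⟨y, by simp, ?_⟩
      intro h
      exact hxy (hx.trans h.symm)
    · exact ⟨x, by simp, hx⟩

-- a node on n's path has more than one dict entry iff some name's lcp with n is that depth
theorem size_gt_one_iff (names : List String) (T : PTrie)
    (hInv : TrieInv T (names.map String.toList)) (n : String) (hn : n ∈ names)
    (p : List Char) (c : Char) (rest : List Char) (hcat : p ++ c :: rest = n.toList)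
    (t : PTrie) (ht : nodeAt T p = some t) :
    (1 < t.size) ↔ ∃ m ∈ names, lcpN m.toList n.toList = p.length := by
  obtain ⟨hm, hk, hnd⟩ := (hInv p).2 t ht
  have hcK : c ∈ t.children.keysList :=
    (hk c).mpr ⟨n.toList, List.mem_map.mpr ⟨n, hn, rfl⟩, by
      rw [← hcat, List.prefix_append_right_inj]
      simp [List.cons_prefix_cons]⟩
  have hlen1 : 1 ≤ t.children.keysList.length := List.length_pos_of_mem hcK
  rw [← hcat]
  constructor
  · intro hs
    unfold PTrie.size at hs
    rw [count_eq_length_keys] at hs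
    by_cases hmk : t.marker.isSome = true
    · obtain ⟨ml, hml, hmp⟩ := List.mem_map.mp (hm.mp hmk)
      exact ⟨ml, hml, by rw [hmp, lcpN_eq_iff]; exact Or.inl rfl⟩
    · have hs2 : 2 ≤ t.children.keysList.length := by
        rw [Bool.not_eq_true] at hmk
        simp [hmk] at hs
        omega
      obtain ⟨d, hdK, hdc⟩ := exists_ne_of_two_le hnd hs2
      obtain ⟨m', hm', hpre⟩ := (hk d).mp hdK
      obtain ⟨ml, hml, hmp⟩ := List.mem_map.mp hm'
      refine ⟨ml, hml, ?_⟩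
      rw [lcpN_eq_iff]
      exact Or.inr ⟨d, hdc, hmp ▸ hpre⟩
  · rintro ⟨ml, hml, hl⟩
    rw [lcpN_eq_iff] at hl
    unfold PTrie.size
    rw [count_eq_length_keys]
    rcases hl with hml' | ⟨d, hdc, hpre⟩
    · have : t.marker.isSome = true :=
        hm.mpr (List.mem_map.mpr ⟨ml, hml, hml'⟩)
      simp [this]
      omega
    · have hdK : d ∈ t.children.keysList :=
        (hk d).mpr ⟨ml.toList, List.mem_map.mpr ⟨ml, hml, rfl⟩, hpre⟩
      have h2d := length_ge_two_of_mem_ne hdK hcK hdc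
      split <;> omega

-- main induction: walking the trie below prefix p computes B's filtered characters
theorem reduced_eq (names : List String) (T : PTrie)
    (hInv : TrieInv T (names.map String.toList)) (n : String) (hn : n ∈ names) :
    ∀ (cs p : List Char) (t : PTrie), nodeAt T p = some t → p ++ cs = n.toList →
    reduced t cs [] = (PySem.List.enumerate cs (p.length : Int)).filterMap
      (fun q => if PySem.Set.contains
          (PySem.Set.ofList (names.map (fun m => lcpAux m.toList n.toList))) q.1
        then some q.2 else none)
  | [], p, t, ht, hcat => by simp [reduced, PySem.List.enumerate]
  | c :: cs, p, t, ht, hcat => by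
    have hsome : (nodeAt T (p ++ [c])).isSome := by
      rw [(hInv (p ++ [c])).1]
      refine Or.inr ⟨n.toList, List.mem_map.mpr ⟨n, hn, rfl⟩, ?_⟩
      rw [← hcat, List.prefix_append_right_inj]
      simp [List.cons_prefix_cons]
    rw [nodeAt_snoc, ht, Option.bind_some] at hsome
    obtain ⟨t', hfind⟩ := Option.isSome_iff_exists.mp hsome
    have ht' : nodeAt T (p ++ [c]) = some t' := by
      rw [nodeAt_snoc, ht, Option.bind_some, hfind]
    have hcat' : (p ++ [c]) ++ cs = n.toList := by simpa using hcat
    have IH := reduced_eq names T hInv n hn cs (p ++ [c]) t' ht' hcat'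
    have hcrit : (1 < t.size) ↔ (PySem.Set.contains
        (PySem.Set.ofList (names.map (fun m => lcpAux m.toList n.toList)))
        ((p.length : Nat) : Int) = true) := by
      rw [PySem.Set.contains_iff, PySem.Set.mem_ofList, List.mem_map]
      rw [size_gt_one_iff names T hInv n hn p c cs hcat t ht]
      constructor
      · rintro ⟨m, hm, hl⟩
        exact ⟨m, hm, by rw [lcpAux_eq, hl]⟩
      · rintro ⟨m, hm, hl⟩
        rw [lcpAux_eq] at hl
        exact ⟨m, hm, by exact_mod_cast hl⟩
    simp only [reduced, hfind, PySem.List.enumerate_cons, List.filterMap_cons]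
    by_cases hs : 1 < t.size
    · have hct := hcrit.mp hs
      simp only [if_pos hs, hct, if_true, List.nil_append]
      rw [reduced_acc cs t' [c], IH]
      simp only [List.singleton_append, List.cons.injEq, true_and]
      congr 2
      simp
    · have hct : ¬ (PySem.Set.contains
          (PySem.Set.ofList (names.map (fun m => lcpAux m.toList n.toList)))
          ((p.length : Nat) : Int) = true) := fun h => hs (hcrit.mpr h)
      simp only [if_neg hs, Bool.not_eq_true] at hct ⊢
      simp only [hct, if_false]
      rw [IH]
      congr 1
      simp

theorem foldl_insert_congr (l : List String) (f g : String → String)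
    (h : ∀ n ∈ l, f n = g n) :
    ∀ d : PySem.Dict String String,
      l.foldl (fun d n => d.insert n (f n)) d = l.foldl (fun d n => d.insert n (g n)) d := by
  induction l with
  | nil => intro d; rfl
  | cons hd tl ih =>
    intro d
    simp only [List.foldl_cons]
    rw [h hd (by simp)]
    exact ih (fun n hn => h n (by simp [hn])) _

-- ===== VERDICT (by name: the statement is the Claim_ definition above) =====
theorem name_compressor_spec : Claim_equal_name_compressor := by
  intro names _ _
  unfold Spec_name_compressor name_compressor name_compressor_alt
  by_cases hlen : names.length = 1
  · rw [if_pos hlen, if_pos hlen]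
  · rw [if_neg hlen, if_neg hlen]
    have hInv : TrieInv
        (names.foldl (fun t name => trieInsert t name.toList name.toList)
          (.node none .nil)) (names.map String.toList) := by
      have := TrieInv_foldl names (.node none .nil) [] TrieInv_empty
      simpa using this
    dsimp only
    congr 1
    apply foldl_insert_congr
    intro n hn
    have h := reduced_eq names _ hInv n hn n.toList [] _ rfl (by simp)
    simp only [List.length_nil, Nat.cast_zero] at h
    exact congrArg String.mk h
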